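-- pv_equiv track=rewrite | github.com/FujitsuResearch/LSPWD | utils/periodic_detection_helper.py | summarize_strings
-- ===== SOURCE A (Python) =====
-- def summarize_strings(strings):
--     """
--     Summarize a list of strings by comparing characters at each position.
--
--     If all strings have the same character at a position, that character is
--     included in the result. If not, an underscore is included.
--
--     Args:
--     strings (list): List of strings to summarize
--
--     Returns:
--     str: Summary of the strings
--     """
--     if not strings:
--         return ""
--
--     # Get length of shortest string
--     min_len = min(len(s) for s in strings)
--
--     # Compare characters at each position
--     result = []
--     for i in range(min_len):
--         chars = set(s[i] for s in strings)
--         # If all strings have the same character at this position, use that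
--         # character. Otherwise, use an underscore.
--         result.append("_" if len(chars) > 1 else strings[0][i])
--
--     return "".join(result)
-- ===== SOURCE B (Python) =====
-- def summarize_strings(strings):
--     if not strings:
--         return ""
--     acc = strings[0]
--     for s in strings[1:]:
--         acc = "".join(c if c == d else "_" for c, d in zip(acc, s))
--     return acc
-- ===== Notes on version B (the rewrite author's own statement) =====
-- stated objective: alternative
-- what changed: Replaces the column-wise pass (min length, range loop, per-position set of characters) by a left fold of pairwise merges: the running consensus string is merged with each next string via zip, keeping a character only where both agree, so no column sets and no explicit min-length are ever built.
import Mathlib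
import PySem

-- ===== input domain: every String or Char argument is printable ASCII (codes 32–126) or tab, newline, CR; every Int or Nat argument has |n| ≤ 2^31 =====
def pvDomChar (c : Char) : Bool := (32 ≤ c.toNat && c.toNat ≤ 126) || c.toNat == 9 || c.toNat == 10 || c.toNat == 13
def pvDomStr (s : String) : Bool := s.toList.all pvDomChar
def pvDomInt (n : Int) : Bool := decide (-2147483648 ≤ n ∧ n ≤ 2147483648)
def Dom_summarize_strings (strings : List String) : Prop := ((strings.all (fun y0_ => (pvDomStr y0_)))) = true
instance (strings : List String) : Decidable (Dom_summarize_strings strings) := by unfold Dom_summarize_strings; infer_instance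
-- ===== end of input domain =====

-- B replaces A's column-wise pass (min length + range loop + per-position set) by a left fold
-- of pairwise merges of the running consensus with each next string (alternative algorithm).

-- ===== PORT A =====
def summarize_strings (strings : List String) : String :=
  match strings with
  | [] => ""
  | s0 :: rest =>
    -- min(len(s) for s in strings): fold of min over the lengths, seeded with the first
    let min_len : Nat := rest.foldl (fun m s => min m s.toList.length) s0.toList.length
    -- i ranges over range(min_len), so every s[i] is in range; the .getD '_' default is unreachable (exact)
    let result : List Char := (List.range min_len).foldl (fun acc i =>
      acc ++ [if (PySem.Set.ofList ((s0 :: rest).map (fun s => (s.toList[i]?).getD '_'))).length > 1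
              then '_'
              else (s0.toList[i]?).getD '_']) []
    String.ofList result

-- ===== PORT B =====
-- one merge step: ''.join(c if c == d else '_' for c, d in zip(acc, s)); zip truncates to the shorter
def pvMerge (a b : List Char) : List Char :=
  (a.zip b).map (fun cd => if cd.1 = cd.2 then cd.1 else '_')

def summarize_strings_alt (strings : List String) : String :=
  match strings with
  | [] => ""
  | s0 :: rest => String.ofList (rest.foldl (fun acc s => pvMerge acc s.toList) s0.toList)

-- ===== PRECONDITION & SPEC =====
def Spec_summarize_strings (strings : List String) (out : String) : Prop := out = summarize_strings_alt strings
instance (strings : List String) (out : String) : Decidable (Spec_summarize_strings strings out) := by unfold Spec_summarize_strings; infer_instance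

-- ===== CLAIM =====
def Claim_equal_summarize_strings : Prop := ∀ (strings : List String), Dom_summarize_strings strings → Spec_summarize_strings strings (summarize_strings strings)

-- ===== LEMMAS AND PROOFS =====

theorem pvFoldlMin_le_init (t : List (List Char)) : ∀ n : Nat,
    t.foldl (fun m l => min m l.length) n ≤ n := by
  induction t with
  | nil => intro n; simp
  | cons b t ih =>
    intro n
    simpa using le_trans (ih (min n b.length)) (Nat.min_le_left _ _)

theorem pvMerge_length (a b : List Char) : (pvMerge a b).length = min a.length b.length := by
  simp [pvMerge]

theorem pvFoldMerge_length : ∀ (rest : List (List Char)) (acc : List Char),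
    (rest.foldl (fun a l => pvMerge a l) acc).length
      = rest.foldl (fun m l => min m l.length) acc.length := by
  intro rest
  induction rest with
  | nil => intro acc; rfl
  | cons b t ih =>
    intro acc
    simp only [List.foldl_cons]
    rw [ih, pvMerge_length]

theorem pvMerge_getD (a b : List Char) (i : Nat) (ha : i < a.length) (hb : i < b.length) :
    (((pvMerge a b)[i]?).getD '_')
      = if (a[i]?).getD '_' = (b[i]?).getD '_' then (a[i]?).getD '_' else '_' := by
  have hi : i < (pvMerge a b).length := by rw [pvMerge_length]; omega
  rw [List.getElem?_eq_getElem hi, List.getElem?_eq_getElem ha, List.getElem?_eq_getElem hb]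
  simp [pvMerge, List.getElem_zip]

theorem pvFoldMerge_getD : ∀ (rest : List (List Char)) (acc : List Char) (i : Nat),
    i < rest.foldl (fun m l => min m l.length) acc.length →
    (((rest.foldl (fun a l => pvMerge a l) acc)[i]?).getD '_')
      = if ∀ l ∈ rest, (l[i]?).getD '_' = (acc[i]?).getD '_'
        then (acc[i]?).getD '_' else '_' := by
  intro rest
  induction rest with
  | nil =>
    intro acc i hi
    simp only [List.foldl_nil]
    rw [if_pos (by intro l hl; simp at hl)]
  | cons b t ih =>
    intro acc i hi
    simp only [List.foldl_cons] at hi ⊢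
    have hmin : i < min acc.length b.length :=
      lt_of_lt_of_le hi (by simpa using pvFoldlMin_le_init t (min acc.length b.length))
    have ha : i < acc.length := by omega
    have hb : i < b.length := by omega
    have hi' : i < t.foldl (fun m l => min m l.length) (pvMerge acc b).length := by
      rw [pvMerge_length]; exact hi
    rw [ih (pvMerge acc b) i hi', pvMerge_getD acc b i ha hb]
    by_cases hab : (acc[i]?).getD '_' = (b[i]?).getD '_'
    · rw [if_pos hab]
      by_cases hall : ∀ l ∈ t, (l[i]?).getD '_' = (acc[i]?).getD '_'
      · rw [if_pos hall, if_pos (by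
          intro l hl
          rcases List.mem_cons.mp hl with h | h
          · subst h; exact hab.symm
          · exact hall l h)]
      · rw [if_neg hall, if_neg (by
          intro hc
          exact hall (fun l hl => hc l (List.mem_cons_of_mem _ hl)))]
    · rw [if_neg hab, ite_self, if_neg (by
        intro hc
        exact hab (hc b List.mem_cons_self).symm)]

theorem pvTwoMem_length {l : List Char} {x y : Char}
    (hx : x ∈ l) (hy : y ∈ l) (hne : x ≠ y) : 1 < l.length := by
  match l with
  | [] => simp at hx
  | [c] =>
    simp at hx hy
    exact absurd (hx.trans hy.symm) hne
  | _ :: _ :: _ => simp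

theorem pvSetOfList_all_eq {a : Char} {xs : List Char} (h : ∀ x ∈ xs, x = a) :
    PySem.Set.ofList (a :: xs) = [a] := by
  have base : PySem.Set.ofList (a :: xs) = xs.foldl PySem.Set.add [a] := by
    simp [PySem.Set.ofList_eq_foldl, PySem.Set.add]
  rw [base]
  clear base
  induction xs with
  | nil => rfl
  | cons b t ih =>
    have hb : b = a := h b List.mem_cons_self
    subst hb
    have : PySem.Set.add [b] b = [b] := by simp [PySem.Set.add, PySem.Set.contains]
    simp only [List.foldl_cons, this]
    exact ih (fun x hx => h x (List.mem_cons_of_mem _ hx))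

theorem pvSetLen_gt_one (a : Char) (xs : List Char) :
    (PySem.Set.ofList (a :: xs)).length > 1 ↔ ¬ (∀ x ∈ xs, x = a) := by
  constructor
  · intro hlen hall
    rw [pvSetOfList_all_eq hall] at hlen
    simp at hlen
  · intro hnot
    push Not at hnot
    rcases hnot with ⟨x, hx, hne⟩
    have hxs : x ∈ PySem.Set.ofList (a :: xs) := by
      rw [PySem.Set.mem_ofList]; exact List.mem_cons_of_mem _ hx
    have has : a ∈ PySem.Set.ofList (a :: xs) := by
      rw [PySem.Set.mem_ofList]; exact List.mem_cons_self
    exact pvTwoMem_length hxs has hne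

theorem pvFoldl_append_map (f : Nat → Char) :
    ∀ (l : List Nat) (acc : List Char),
      l.foldl (fun acc i => acc ++ [f i]) acc = acc ++ l.map f := by
  intro l
  induction l with
  | nil => intro acc; simp
  | cons a t ih => intro acc; simp [ih]

-- ===== VERDICT =====
theorem summarize_strings_spec : Claim_equal_summarize_strings := by
  intro strings _
  unfold Spec_summarize_strings summarize_strings summarize_strings_alt
  match strings with
  | [] => rfl
  | s0 :: rest =>
    simp only
    rw [pvFoldl_append_map, List.nil_append]
    refine congrArg String.ofList ?_
    -- rewrite B's fold over strings as a fold over char lists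
    have hfold : rest.foldl (fun acc s => pvMerge acc s.toList) s0.toList
        = (rest.map String.toList).foldl (fun a l => pvMerge a l) s0.toList := by
      rw [List.foldl_map]
    have hmin : (rest.map String.toList).foldl (fun m l => min m l.length) s0.toList.length
        = rest.foldl (fun m s => min m s.toList.length) s0.toList.length := by
      rw [List.foldl_map]
    set min_len := rest.foldl (fun m s => min m s.toList.length) s0.toList.length with hml
    apply List.ext_getElem?
    intro i
    have hlenB : (rest.foldl (fun acc s => pvMerge acc s.toList) s0.toList).length = min_len := by
      rw [hfold, pvFoldMerge_length, hmin]
    by_cases hi : i < min_len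
    · simp only [List.getElem?_map, List.getElem?_range hi, Option.map_some]
      have hiB : i < (rest.foldl (fun acc s => pvMerge acc s.toList) s0.toList).length := by
        rw [hlenB]; exact hi
      rw [List.getElem?_eq_getElem hiB]
      have hgd := pvFoldMerge_getD (rest.map String.toList) s0.toList i
        (by rw [hmin]; exact hi)
      rw [← hfold] at hgd
      rw [List.getElem?_eq_getElem hiB] at hgd
      simp only [Option.getD_some] at hgd
      rw [hgd]
      -- identify A's set test with the all-equal condition
      have hmap : (s0 :: rest).map (fun s => (s.toList[i]?).getD '_')
          = ((s0.toList[i]?).getD '_') :: rest.map (fun s => (s.toList[i]?).getD '_') := rfl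
      rw [hmap, Option.some_inj]
      by_cases hall : ∀ l ∈ rest.map String.toList, (l[i]?).getD '_' = (s0.toList[i]?).getD '_'
      · rw [if_pos hall, if_neg (by
          rw [pvSetLen_gt_one]
          intro hc
          apply hc
          intro x hx
          rcases List.mem_map.mp hx with ⟨s, hs, hxs⟩
          subst hxs
          exact hall s.toList (List.mem_map_of_mem hs))]
      · rw [if_neg hall, if_pos (by
          rw [pvSetLen_gt_one]
          intro hc
          apply hall
          intro l hl
          rcases List.mem_map.mp hl with ⟨s, hs, hls⟩
          subst hls
          exact hc _ (List.mem_map_of_mem hs))]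
    · rw [List.getElem?_eq_none (by simpa using Nat.le_of_not_lt hi),
        List.getElem?_eq_none (by rw [hlenB]; omega)]
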